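-- pv_equiv track=rewrite | github.com/joseph62/cse480-databases | Project3/project.py | parse_args_list
-- ===== SOURCE A (Python) =====
-- def parse_args_list(tokens):
--     results = []
--     column_args = []
--     for token in tokens:
--         if token == "(":
--             continue
--         elif token == ")":
--             # Process column args and stop
--             break
--         elif token == ",":
--             # Process column args
--             results.append(column_args)
--             # reset args
--             column_args = []
--         else:
--             column_args.append(token)
--     results.append(column_args)
--     return results
-- ===== SOURCE B (Python) =====
-- def parse_args_list(tokens):
--     if ")" in tokens:
--         tokens = tokens[:tokens.index(")")]
--     flat = [t for t in tokens if t != "("]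
--     commas = [i for i, t in enumerate(flat) if t == ","]
--     groups = []
--     start = 0
--     for c in commas:
--         groups.append(flat[start:c])
--         start = c + 1
--     groups.append(flat[start:])
--     return groups
-- ===== Notes on version B (the rewrite author's own statement) =====
-- stated objective: alternative
-- what changed: Replaces A's single accumulating pass (with break/continue and mutable group state) by an index-and-slice decomposition: truncate at the first ')', filter out '(', compute the list of comma positions, and slice the filtered list between consecutive comma boundaries.
import Mathlib
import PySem

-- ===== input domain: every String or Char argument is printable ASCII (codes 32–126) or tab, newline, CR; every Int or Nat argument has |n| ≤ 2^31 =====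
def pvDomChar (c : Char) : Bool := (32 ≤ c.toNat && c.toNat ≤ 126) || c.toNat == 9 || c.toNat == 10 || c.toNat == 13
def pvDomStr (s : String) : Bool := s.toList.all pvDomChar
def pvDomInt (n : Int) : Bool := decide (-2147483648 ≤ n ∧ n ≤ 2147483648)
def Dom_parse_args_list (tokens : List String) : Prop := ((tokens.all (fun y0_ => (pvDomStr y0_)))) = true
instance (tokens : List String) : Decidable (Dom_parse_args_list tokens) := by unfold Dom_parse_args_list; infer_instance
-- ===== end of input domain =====

-- B replaces A's single accumulating pass by truncate-at-')' / filter-'(' / comma-index-and-slice; objective: alternative decomposition.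

-- ===== PORT A =====
def pvLoopA : List String → List (List String) → List String → List (List String)
  | [], results, col => results ++ [col]
  | t :: rest, results, col =>
    if t = "(" then pvLoopA rest results col
    else if t = ")" then results ++ [col]
    else if t = "," then pvLoopA rest (results ++ [col]) []
    else pvLoopA rest results (col ++ [t])

def parse_args_list (tokens : List String) : List (List String) :=
  pvLoopA tokens [] []

-- ===== PORT B =====
-- comma positions of flat (indices starting at i): [i for i, t in enumerate(flat) if t == ","]
def pvCommaIdx : List String → Nat → List Nat
  | [], _ => []
  | t :: rest, i => if t = "," then i :: pvCommaIdx rest (i+1) else pvCommaIdx rest (i+1)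

-- the loop over comma positions: slices flat[start:c] per comma, then flat[start:]
def pvSliceGroups (flat : List String) : List Nat → Nat → List (List String)
  | [], start => [flat.drop start]
  | c :: cs, start => (flat.drop start).take (c - start) :: pvSliceGroups flat cs (c+1)

def parse_args_list_alt (tokens : List String) : List (List String) :=
  let tokens' := match PySem.List.index? tokens ")" with
    | some i => tokens.take i
    | none => tokens
  let flat := tokens'.filter (fun t => t != "(")
  pvSliceGroups flat (pvCommaIdx flat 0) 0

-- ===== PRECONDITION & SPEC =====
def Spec_parse_args_list (tokens : List String) (out : List (List String)) : Prop := out = parse_args_list_alt tokens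
instance (tokens : List String) (out : List (List String)) : Decidable (Spec_parse_args_list tokens out) := by unfold Spec_parse_args_list; infer_instance

-- ===== CLAIM (what is proved, stated in full; the proofs are below) =====
def Claim_equal_parse_args_list : Prop := ∀ (tokens : List String), Dom_parse_args_list tokens → Spec_parse_args_list tokens (parse_args_list tokens)

-- ===== LEMMAS AND PROOFS =====

-- reference splitter: split a clean token list on ","
def pvPrepend (t : String) : List (List String) → List (List String)
  | [] => [[t]]
  | g :: gs => (t :: g) :: gs

def pvSplit : List String → List (List String)
  | [] => [[]]
  | t :: rest => if t = "," then [] :: pvSplit rest else pvPrepend t (pvSplit rest)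

def pvPrependAll (col : List String) : List (List String) → List (List String)
  | [] => [col]
  | g :: gs => (col ++ g) :: gs

def pvClean (tokens : List String) : List String :=
  (tokens.takeWhile (fun t => t != ")")).filter (fun t => t != "(")

theorem pvSplit_ne_nil (xs : List String) : pvSplit xs ≠ [] := by
  cases xs with
  | nil => simp [pvSplit]
  | cons t rest =>
    simp only [pvSplit]
    split
    · simp
    · cases h : pvSplit rest <;> simp [pvPrepend]

theorem pvPrependAll_nil (gs : List (List String)) (h : gs ≠ []) : pvPrependAll [] gs = gs := by
  cases gs with
  | nil => exact absurd rfl h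
  | cons g gs' => simp [pvPrependAll]

theorem pvPrependAll_append (col : List String) (t : String) (gs : List (List String)) :
    pvPrependAll (col ++ [t]) gs = pvPrependAll col (pvPrepend t gs) := by
  cases gs <;> simp [pvPrependAll, pvPrepend]

-- A's loop computes prependAll col of the reference split of the cleaned tokens
theorem pvLoopA_eq (tokens : List String) :
    ∀ results col, pvLoopA tokens results col = results ++ pvPrependAll col (pvSplit (pvClean tokens)) := by
  induction tokens with
  | nil => intro results col; simp [pvLoopA, pvClean, pvSplit, pvPrependAll]
  | cons t rest ih =>
    intro results col
    by_cases hp : t = "("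
    · subst hp
      simp only [pvLoopA]
      rw [ih]
      simp [pvClean]
    · by_cases hr : t = ")"
      · subst hr
        simp [pvLoopA, pvClean, pvSplit, pvPrependAll]
      · by_cases hc : t = ","
        · subst hc
          have hclean : pvClean ("," :: rest) = "," :: pvClean rest := by
            simp [pvClean]
          simp only [pvLoopA, if_neg hp, if_neg hr]
          rw [ih, hclean]
          simp only [pvSplit]
          rw [pvPrependAll_nil _ (pvSplit_ne_nil _)]
          simp [pvPrependAll]
        · have hclean : pvClean (t :: rest) = t :: pvClean rest := by
            simp [pvClean, hr, hp]
          simp only [pvLoopA, if_neg hp, if_neg hr, if_neg hc]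
          rw [ih, hclean]
          simp only [pvSplit, if_neg hc]
          rw [pvPrependAll_append]

theorem parse_args_list_eq_split (tokens : List String) :
    parse_args_list tokens = pvSplit (pvClean tokens) := by
  rw [parse_args_list, pvLoopA_eq, pvPrependAll_nil _ (pvSplit_ne_nil _)]
  simp

-- B side
theorem pvCommaIdx_shift (xs : List String) : ∀ i, pvCommaIdx xs (i+1) = (pvCommaIdx xs i).map (· + 1) := by
  induction xs with
  | nil => intro i; simp [pvCommaIdx]
  | cons t rest ih =>
    intro i
    by_cases h : t = "," <;> simp [pvCommaIdx, h, ih]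

theorem pvSliceGroups_shift (t : String) (rest : List String) (cs : List Nat) :
    ∀ start, pvSliceGroups (t :: rest) (cs.map (· + 1)) (start+1) = pvSliceGroups rest cs start := by
  induction cs with
  | nil => intro start; simp [pvSliceGroups]
  | cons c cs ih =>
    intro start
    simp only [List.map_cons, pvSliceGroups, List.drop_succ_cons]
    have h1 : c + 1 - (start + 1) = c - start := by omega
    rw [h1, ih]

theorem pvSliceGroups_prepend (t : String) (rest : List String) (cs : List Nat) :
    pvSliceGroups (t :: rest) (cs.map (· + 1)) 0 = pvPrepend t (pvSliceGroups rest cs 0) := by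
  cases cs with
  | nil => simp [pvSliceGroups, pvPrepend]
  | cons c cs =>
    simp only [List.map_cons, pvSliceGroups, List.drop_zero, pvPrepend]
    rw [pvSliceGroups_shift]
    simp

theorem pvSliceGroups_eq_split (flat : List String) :
    pvSliceGroups flat (pvCommaIdx flat 0) 0 = pvSplit flat := by
  induction flat with
  | nil => simp [pvCommaIdx, pvSliceGroups, pvSplit]
  | cons t rest ih =>
    by_cases h : t = ","
    · subst h
      simp only [pvCommaIdx, pvCommaIdx_shift, pvSplit]
      show ((("," :: rest).drop 0).take (0 - 0)) :: pvSliceGroups ("," :: rest) ((pvCommaIdx rest 0).map (· + 1)) (0 + 1) = [] :: pvSplit rest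
      rw [pvSliceGroups_shift, ih]
      simp
    · simp only [pvCommaIdx, if_neg h, pvCommaIdx_shift, pvSplit]
      rw [pvSliceGroups_prepend, ih]

theorem pvTruncate_eq_takeWhile (tokens : List String) :
    (match PySem.List.index? tokens ")" with
      | some i => tokens.take i
      | none => tokens) = tokens.takeWhile (fun t => t != ")") := by
  induction tokens with
  | nil => simp [PySem.List.index?]
  | cons t rest ih =>
    by_cases h : t = ")"
    · subst h
      rw [PySem.List.index?_cons_self]
      simp
    · rw [PySem.List.index?_cons_of_ne rest h]
      cases hidx : PySem.List.index? rest ")" with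
      | none =>
        rw [hidx] at ih
        simp only [Option.map_none]
        simp [h, ← ih]
      | some i =>
        rw [hidx] at ih
        simp only [Option.map_some]
        simp [h, ← ih]

theorem parse_args_list_alt_eq_split (tokens : List String) :
    parse_args_list_alt tokens = pvSplit (pvClean tokens) := by
  rw [parse_args_list_alt]
  simp only [pvTruncate_eq_takeWhile]
  rw [pvSliceGroups_eq_split]
  rfl

-- ===== VERDICT (by name: the statement is the Claim_ definition above) =====
theorem parse_args_list_spec : Claim_equal_parse_args_list := by
  intro tokens _
  unfold Spec_parse_args_list
  rw [parse_args_list_eq_split, parse_args_list_alt_eq_split]
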